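-- pv_equiv track=rewrite | github.com/genixpro/swiftly-ai | server/appraisal/components/income_statement_data_extractor.py | chooseItemAmountKeyForYear
-- ===== SOURCE A (Python) =====
-- def chooseItemAmountKeyForYear(itemAmountKeys, documentYear, relevantYear):
--     filteredKeys = [key for key in itemAmountKeys if 'PERCENTAGE' not in key[1] and 'PSF' not in key[1]]
--
--     if documentYear == relevantYear:
--         filteredKeys = [key for key in filteredKeys if len(key[1]) == 0]
--     elif (documentYear + 1) == relevantYear:
--         filteredKeys = [key for key in filteredKeys if 'NEXT_YEAR' in key[1]]
--     elif (documentYear + 2) == relevantYear: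
--         filteredKeys = [key for key in filteredKeys if 'NEXT_YEAR_2' in key[1]]
--     elif (documentYear - 1) == relevantYear:
--         filteredKeys = [key for key in filteredKeys if 'PREVIOUS_YEAR' in key[1]]
--     elif (documentYear - 2) == relevantYear:
--         filteredKeys = [key for key in filteredKeys if 'PREVIOUS_YEAR_2' in key[1]]
--     elif (documentYear - 3) == relevantYear:
--         filteredKeys = [key for key in filteredKeys if 'PREVIOUS_YEAR_3' in key[1]]
--     elif (documentYear - 4) == relevantYear:
--         filteredKeys = [key for key in filteredKeys if 'PREVIOUS_YEAR_3' in key[1]]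
--
--     for key in filteredKeys:
--         if key[0] == 'ACTUALS':
--             return key
--
--     for key in filteredKeys:
--         if key[0] == 'FORECAST':
--             return key
--
--     for key in filteredKeys:
--         if key[0] == 'YEAR_TO_DATE':
--             return key
--
--     return None
-- ===== SOURCE B (Python) =====
-- _RANK = {'ACTUALS': 0, 'FORECAST': 1, 'YEAR_TO_DATE': 2}
--
--
-- def _yearTag(offset):
--     if offset == 0:
--         return ''
--     if offset == 1:
--         return 'NEXT_YEAR'
--     if offset == 2:
--         return 'NEXT_YEAR_2'
--     if offset == -1:
--         return 'PREVIOUS_YEAR'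
--     if offset == -2:
--         return 'PREVIOUS_YEAR_2'
--     if offset == -3 or offset == -4:
--         return 'PREVIOUS_YEAR_3'
--     return None
--
--
-- def chooseItemAmountKeyForYear(itemAmountKeys, documentYear, relevantYear):
--     tag = _yearTag(relevantYear - documentYear)
--     best, bestRank = None, 3
--     for key in itemAmountKeys:
--         label = key[1]
--         if 'PERCENTAGE' in label or 'PSF' in label:
--             continue
--         if tag == '':
--             if len(label) != 0:
--                 continue
--         elif tag is not None and tag not in label:
--             continue
--         r = _RANK.get(key[0], 3)
--         if r < bestRank:
--             best, bestRank = key, r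
--     return best
-- ===== Notes on version B (the rewrite author's own statement) =====
-- stated objective: idiomatic
-- what changed: Replaces the build-two-filtered-lists-then-three-sequential-priority-scans structure with a single pass over the input that skips non-matching keys inline (year tag computed once from the offset) and tracks the best key by a priority map with strict '<' so the first key at the lowest rank wins.
import Mathlib
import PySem

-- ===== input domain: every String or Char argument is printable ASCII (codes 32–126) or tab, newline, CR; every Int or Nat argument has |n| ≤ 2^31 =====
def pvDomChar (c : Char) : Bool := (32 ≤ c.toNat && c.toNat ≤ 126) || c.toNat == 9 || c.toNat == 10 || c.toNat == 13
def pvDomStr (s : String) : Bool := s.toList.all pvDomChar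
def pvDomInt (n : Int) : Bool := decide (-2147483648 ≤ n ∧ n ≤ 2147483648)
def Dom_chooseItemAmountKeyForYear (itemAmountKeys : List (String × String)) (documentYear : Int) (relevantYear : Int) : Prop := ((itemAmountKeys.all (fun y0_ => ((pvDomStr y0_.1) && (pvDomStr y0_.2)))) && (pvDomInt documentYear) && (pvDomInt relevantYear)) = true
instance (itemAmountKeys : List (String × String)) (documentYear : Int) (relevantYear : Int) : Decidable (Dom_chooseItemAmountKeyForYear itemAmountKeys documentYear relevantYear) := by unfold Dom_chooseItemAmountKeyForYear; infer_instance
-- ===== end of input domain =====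

-- B folds A's year filter and the three priority scans into one pass tracking the best-ranked key (idiomatic single pass; same asymptotic cost).

-- ===== PORT A =====
def chooseItemAmountKeyForYear (itemAmountKeys : List (String × String)) (documentYear : Int) (relevantYear : Int) : Option (String × String) :=
  let filteredKeys := itemAmountKeys.filter (fun key => !(PySem.Str.isIn "PERCENTAGE" key.2) && !(PySem.Str.isIn "PSF" key.2))
  let filteredKeys2 :=
    if documentYear = relevantYear then filteredKeys.filter (fun key => PySem.Str.len key.2 == 0)
    else if documentYear + 1 = relevantYear then filteredKeys.filter (fun key => PySem.Str.isIn "NEXT_YEAR" key.2)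
    else if documentYear + 2 = relevantYear then filteredKeys.filter (fun key => PySem.Str.isIn "NEXT_YEAR_2" key.2)
    else if documentYear - 1 = relevantYear then filteredKeys.filter (fun key => PySem.Str.isIn "PREVIOUS_YEAR" key.2)
    else if documentYear - 2 = relevantYear then filteredKeys.filter (fun key => PySem.Str.isIn "PREVIOUS_YEAR_2" key.2)
    else if documentYear - 3 = relevantYear then filteredKeys.filter (fun key => PySem.Str.isIn "PREVIOUS_YEAR_3" key.2)
    else if documentYear - 4 = relevantYear then filteredKeys.filter (fun key => PySem.Str.isIn "PREVIOUS_YEAR_3" key.2)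
    else filteredKeys
  match filteredKeys2.find? (fun key => key.1 == "ACTUALS") with
  | some key => some key
  | none =>
    match filteredKeys2.find? (fun key => key.1 == "FORECAST") with
    | some key => some key
    | none =>
      match filteredKeys2.find? (fun key => key.1 == "YEAR_TO_DATE") with
      | some key => some key
      | none => none

-- ===== PORT B =====
def pvRank : PySem.Dict String Int :=
  PySem.Dict.ofList [("ACTUALS", 0), ("FORECAST", 1), ("YEAR_TO_DATE", 2)]

def pvYearTag (offset : Int) : Option String :=
  if offset = 0 then some ""
  else if offset = 1 then some "NEXT_YEAR"
  else if offset = 2 then some "NEXT_YEAR_2"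
  else if offset = -1 then some "PREVIOUS_YEAR"
  else if offset = -2 then some "PREVIOUS_YEAR_2"
  else if offset = -3 ∨ offset = -4 then some "PREVIOUS_YEAR_3"
  else none

-- the body of B's loop: skip filtered-out keys, otherwise keep the strictly better-ranked key
def pvAltStep (tag : Option String) (st : Option (String × String) × Int) (key : String × String) : Option (String × String) × Int :=
  if PySem.Str.isIn "PERCENTAGE" key.2 || PySem.Str.isIn "PSF" key.2 then st
  else
    let skip : Bool :=
      match tag with
      | some t => if t == "" then !(PySem.Str.len key.2 == 0) else !(PySem.Str.isIn t key.2)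
      | none => false
    if skip then st
    else
      let r := PySem.Dict.getD pvRank key.1 3
      if r < st.2 then (some key, r) else st

def chooseItemAmountKeyForYear_alt (itemAmountKeys : List (String × String)) (documentYear : Int) (relevantYear : Int) : Option (String × String) :=
  (itemAmountKeys.foldl (pvAltStep (pvYearTag (relevantYear - documentYear))) (none, 3)).1

-- ===== PRECONDITION & SPEC =====
def Spec_chooseItemAmountKeyForYear (itemAmountKeys : List (String × String)) (documentYear : Int) (relevantYear : Int) (out : Option (String × String)) : Prop := out = chooseItemAmountKeyForYear_alt itemAmountKeys documentYear relevantYear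
instance (itemAmountKeys : List (String × String)) (documentYear : Int) (relevantYear : Int) (out : Option (String × String)) : Decidable (Spec_chooseItemAmountKeyForYear itemAmountKeys documentYear relevantYear out) := by unfold Spec_chooseItemAmountKeyForYear; infer_instance

-- ===== CLAIM (what is proved, stated in full; the proofs are below) =====
def Claim_equal_chooseItemAmountKeyForYear : Prop := ∀ (itemAmountKeys : List (String × String)) (documentYear : Int) (relevantYear : Int), Dom_chooseItemAmountKeyForYear itemAmountKeys documentYear relevantYear → Spec_chooseItemAmountKeyForYear itemAmountKeys documentYear relevantYear (chooseItemAmountKeyForYear itemAmountKeys documentYear relevantYear)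

-- ===== LEMMAS AND PROOFS =====

-- "merge" of two (candidate, rank) states: strictly better rank wins, the left (earlier) one wins ties.
def pvMerge (a b : Option (String × String) × Int) : Option (String × String) × Int :=
  if b.2 < a.2 then b else a

-- the (candidate, rank) pair that A's three sequential scans select on a (filtered) list
def pvSpeck (l : List (String × String)) : Option (String × String) × Int :=
  match l.find? (fun key => key.1 == "ACTUALS") with
  | some key => (some key, 0)
  | none =>
    match l.find? (fun key => key.1 == "FORECAST") with
    | some key => (some key, 1)
    | none =>
      match l.find? (fun key => key.1 == "YEAR_TO_DATE") with
      | some key => (some key, 2)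
      | none => (none, 3)

-- the combined keep-predicate B's loop applies, as a function of the year tag
def pvPred (tag : Option String) (key : String × String) : Bool :=
  (!(PySem.Str.isIn "PERCENTAGE" key.2) && !(PySem.Str.isIn "PSF" key.2)) &&
  (match tag with
   | some t => if t == "" then PySem.Str.len key.2 == 0 else PySem.Str.isIn t key.2
   | none => true)

-- B's loop body, re-expressed with the keep-predicate up front
def pvStep (p : (String × String) → Bool) (st : Option (String × String) × Int) (key : String × String) : Option (String × String) × Int :=
  if p key then
    let r := PySem.Dict.getD pvRank key.1 3
    if r < st.2 then (some key, r) else st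
  else st

lemma pvMerge_assoc (a b c : Option (String × String) × Int) :
    pvMerge (pvMerge a b) c = pvMerge a (pvMerge b c) := by
  unfold pvMerge; split_ifs <;> first | rfl | omega

lemma pvMerge_or (a b : Option (String × String) × Int) : pvMerge a b = a ∨ pvMerge a b = b := by
  unfold pvMerge; split_ifs <;> simp

lemma pvSpeck_rank_nonneg (l : List (String × String)) : 0 ≤ (pvSpeck l).2 := by
  unfold pvSpeck
  cases l.find? (fun key => key.1 == "ACTUALS") <;>
    cases l.find? (fun key => key.1 == "FORECAST") <;>
      cases l.find? (fun key => key.1 == "YEAR_TO_DATE") <;> simp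

lemma pvMerge_none3 (l : List (String × String)) : pvMerge (none, 3) (pvSpeck l) = pvSpeck l := by
  unfold pvMerge pvSpeck
  cases l.find? (fun key => key.1 == "ACTUALS") <;>
    cases l.find? (fun key => key.1 == "FORECAST") <;>
      cases l.find? (fun key => key.1 == "YEAR_TO_DATE") <;> simp

lemma pvRank_getD_of_other (s : String) (hA : s ≠ "ACTUALS") (hF : s ≠ "FORECAST")
    (hY : s ≠ "YEAR_TO_DATE") : PySem.Dict.getD pvRank s 3 = 3 := by
  simp [pvRank, PySem.Dict.ofList, PySem.Dict.update, PySem.Dict.getD_insert, PySem.Dict.getD_empty,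
    hA, hF, hY]

lemma pvSpeck_cons (x : String × String) (l : List (String × String)) :
    pvSpeck (x :: l) =
      if x.1 == "ACTUALS" ∨ x.1 == "FORECAST" ∨ x.1 == "YEAR_TO_DATE" then
        pvMerge (some x, PySem.Dict.getD pvRank x.1 3) (pvSpeck l)
      else pvSpeck l := by
  by_cases hA : x.1 = "ACTUALS"
  · have h0 : PySem.Dict.getD pvRank x.1 3 = 0 := by rw [hA]; decide
    simp only [pvSpeck, List.find?_cons, hA]
    simp only [pvMerge, h0]
    have := pvSpeck_rank_nonneg l
    simp only [pvSpeck] at this ⊢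
    cases hf : l.find? (fun key => key.1 == "ACTUALS") <;>
      cases hg : l.find? (fun key => key.1 == "FORECAST") <;>
        cases hh : l.find? (fun key => key.1 == "YEAR_TO_DATE") <;>
          simp_all <;> omega
  · by_cases hF : x.1 = "FORECAST"
    · have h1 : PySem.Dict.getD pvRank x.1 3 = 1 := by rw [hF]; decide
      simp only [pvSpeck, List.find?_cons, hF]
      simp only [pvMerge, h1]
      cases hf : l.find? (fun key => key.1 == "ACTUALS") <;>
        cases hg : l.find? (fun key => key.1 == "FORECAST") <;>
          cases hh : l.find? (fun key => key.1 == "YEAR_TO_DATE") <;>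
            simp_all
    · by_cases hY : x.1 = "YEAR_TO_DATE"
      · have h2 : PySem.Dict.getD pvRank x.1 3 = 2 := by rw [hY]; decide
        simp only [pvSpeck, List.find?_cons, hY]
        simp only [pvMerge, h2]
        cases hf : l.find? (fun key => key.1 == "ACTUALS") <;>
          cases hg : l.find? (fun key => key.1 == "FORECAST") <;>
            cases hh : l.find? (fun key => key.1 == "YEAR_TO_DATE") <;>
              simp_all
      · have f1 : (x :: l).find? (fun key => key.1 == "ACTUALS") = l.find? (fun key => key.1 == "ACTUALS") :=
          List.find?_cons_of_neg (by simp [hA])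
        have f2 : (x :: l).find? (fun key => key.1 == "FORECAST") = l.find? (fun key => key.1 == "FORECAST") :=
          List.find?_cons_of_neg (by simp [hF])
        have f3 : (x :: l).find? (fun key => key.1 == "YEAR_TO_DATE") = l.find? (fun key => key.1 == "YEAR_TO_DATE") :=
          List.find?_cons_of_neg (by simp [hY])
        rw [if_neg (by simp [hA, hF, hY])]
        unfold pvSpeck
        rw [f1, f2, f3]

lemma pvAltStep_eq_pvStep (tag : Option String) (st : Option (String × String) × Int)
    (key : String × String) : pvAltStep tag st key = pvStep (pvPred tag) st key := by
  unfold pvAltStep pvStep pvPred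
  cases h1 : PySem.Str.isIn "PERCENTAGE" key.2 <;>
    cases h2 : PySem.Str.isIn "PSF" key.2 <;>
      simp only [h1, h2, Bool.false_or, Bool.true_or, Bool.or_false, Bool.or_true,
        Bool.not_false, Bool.not_true, Bool.true_and, Bool.false_and, Bool.and_true,
        Bool.and_false, if_true, if_false, Bool.false_eq_true, Bool.true_eq_false, ite_false,
        ite_true]
  case false.false =>
    cases tag with
    | none => rfl
    | some t =>
      cases hb : (t == "") <;> simp only [hb, if_true, if_false, Bool.false_eq_true, ite_false, ite_true]
      · cases hc : PySem.Str.isIn t key.2 <;>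
          simp only [hc, Bool.not_false, Bool.not_true, Bool.false_eq_true, Bool.true_and,
            ite_false, ite_true]
      · cases hc : (PySem.Str.len key.2 == 0) <;>
          simp only [hc, Bool.not_false, Bool.not_true, Bool.false_eq_true, Bool.true_and,
            ite_false, ite_true]

lemma foldl_pvStep (p : (String × String) → Bool) :
    ∀ (xs : List (String × String)) (st : Option (String × String) × Int), st.2 ≤ 3 →
      xs.foldl (pvStep p) st = pvMerge st (pvSpeck (xs.filter p)) := by
  intro xs
  induction xs with
  | nil =>
    intro st hst
    simp [pvSpeck, pvMerge]
    omega
  | cons x xs ih =>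
    intro st hst
    by_cases hp : p x
    · by_cases hother : x.1 = "ACTUALS" ∨ x.1 = "FORECAST" ∨ x.1 = "YEAR_TO_DATE"
      · have hmain : pvStep p st x = pvMerge st (some x, PySem.Dict.getD pvRank x.1 3) := by
          simp [pvStep, hp, pvMerge]
        have hrank2 : (pvMerge st (some x, PySem.Dict.getD pvRank x.1 3)).2 ≤ 3 := by
          rcases pvMerge_or st (some x, PySem.Dict.getD pvRank x.1 3) with h | h <;> rw [h]
          · exact hst
          · rcases hother with h' | h' | h' <;> simp [h'] <;> decide
        calc (x :: xs).foldl (pvStep p) st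
            = xs.foldl (pvStep p) (pvStep p st x) := by simp
          _ = pvMerge (pvMerge st (some x, PySem.Dict.getD pvRank x.1 3)) (pvSpeck (xs.filter p)) := by
              rw [hmain]; exact ih _ (hmain ▸ hrank2)
          _ = pvMerge st (pvMerge (some x, PySem.Dict.getD pvRank x.1 3) (pvSpeck (xs.filter p))) :=
              pvMerge_assoc _ _ _
          _ = pvMerge st (pvSpeck ((x :: xs).filter p)) := by
              rw [List.filter_cons_of_pos hp, pvSpeck_cons]
              have hcond : (x.1 == "ACTUALS" ∨ x.1 == "FORECAST" ∨ x.1 == "YEAR_TO_DATE") := by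
                rcases hother with h | h | h <;> simp [h]
              rw [if_pos hcond]
      · push_neg at hother
        obtain ⟨hA, hF, hY⟩ := hother
        have hr3 : PySem.Dict.getD pvRank x.1 3 = 3 := pvRank_getD_of_other x.1 hA hF hY
        have hstep : pvStep p st x = st := by
          simp only [pvStep, hp, if_true, hr3]
          rw [if_neg (by omega)]
        have hsp : pvSpeck ((x :: xs).filter p) = pvSpeck (xs.filter p) := by
          rw [List.filter_cons_of_pos hp, pvSpeck_cons]
          rw [if_neg]
          simp [hA, hF, hY]
        rw [hsp, ← ih st hst]
        simp [hstep]
    · have hstep : pvStep p st x = st := by simp [pvStep, hp]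
      rw [List.filter_cons_of_neg (by simp [hp]), ← ih st hst]
      simp [hstep]

lemma pvSpeck_fst (l : List (String × String)) :
    (match l.find? (fun key => key.1 == "ACTUALS") with
     | some key => some key
     | none =>
       match l.find? (fun key => key.1 == "FORECAST") with
       | some key => some key
       | none =>
         match l.find? (fun key => key.1 == "YEAR_TO_DATE") with
         | some key => some key
         | none => none) = (pvSpeck l).1 := by
  unfold pvSpeck
  cases l.find? (fun key => key.1 == "ACTUALS") <;>
    cases l.find? (fun key => key.1 == "FORECAST") <;>
      cases l.find? (fun key => key.1 == "YEAR_TO_DATE") <;> simp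

lemma alt_eq_speck (itemAmountKeys : List (String × String)) (documentYear relevantYear : Int) :
    chooseItemAmountKeyForYear_alt itemAmountKeys documentYear relevantYear =
      (pvSpeck (itemAmountKeys.filter (pvPred (pvYearTag (relevantYear - documentYear))))).1 := by
  unfold chooseItemAmountKeyForYear_alt
  have hfun : pvAltStep (pvYearTag (relevantYear - documentYear)) =
      pvStep (pvPred (pvYearTag (relevantYear - documentYear))) :=
    funext fun st => funext fun key => pvAltStep_eq_pvStep _ st key
  rw [hfun, foldl_pvStep _ _ (none, 3) (by simp), pvMerge_none3]

-- ===== VERDICT (by name: the statement is the Claim_ definition above) =====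
theorem chooseItemAmountKeyForYear_spec : Claim_equal_chooseItemAmountKeyForYear := by
  intro itemAmountKeys documentYear relevantYear _
  unfold Spec_chooseItemAmountKeyForYear
  rw [alt_eq_speck]
  unfold chooseItemAmountKeyForYear
  simp only []
  by_cases h0 : documentYear = relevantYear
  · have htag : pvYearTag (relevantYear - documentYear) = some "" := by
      have e : relevantYear - documentYear = 0 := by omega
      rw [e]; decide
    rw [if_pos h0, htag, List.filter_filter, pvSpeck_fst]
    congr 2
    exact List.filter_congr fun x _ => by unfold pvPred; simp only [String.reduceBEq, Bool.false_eq_true, if_false, if_true]; rw [Bool.and_comm]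
  · rw [if_neg h0]
    by_cases h1 : documentYear + 1 = relevantYear
    · have htag : pvYearTag (relevantYear - documentYear) = some "NEXT_YEAR" := by
        have e : relevantYear - documentYear = 1 := by omega
        rw [e]; decide
      rw [if_pos h1, htag, List.filter_filter, pvSpeck_fst]
      congr 2
      exact List.filter_congr fun x _ => by unfold pvPred; simp only [String.reduceBEq, Bool.false_eq_true, if_false, if_true]; rw [Bool.and_comm]
    · rw [if_neg h1]
      by_cases h2 : documentYear + 2 = relevantYear
      · have htag : pvYearTag (relevantYear - documentYear) = some "NEXT_YEAR_2" := by
          have e : relevantYear - documentYear = 2 := by omega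
          rw [e]; decide
        rw [if_pos h2, htag, List.filter_filter, pvSpeck_fst]
        congr 2
        exact List.filter_congr fun x _ => by unfold pvPred; simp only [String.reduceBEq, Bool.false_eq_true, if_false, if_true]; rw [Bool.and_comm]
      · rw [if_neg h2]
        by_cases h3 : documentYear - 1 = relevantYear
        · have htag : pvYearTag (relevantYear - documentYear) = some "PREVIOUS_YEAR" := by
            have e : relevantYear - documentYear = -1 := by omega
            rw [e]; decide
          rw [if_pos h3, htag, List.filter_filter, pvSpeck_fst]
          congr 2
          exact List.filter_congr fun x _ => by unfold pvPred; simp only [String.reduceBEq, Bool.false_eq_true, if_false, if_true]; rw [Bool.and_comm]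
        · rw [if_neg h3]
          by_cases h4 : documentYear - 2 = relevantYear
          · have htag : pvYearTag (relevantYear - documentYear) = some "PREVIOUS_YEAR_2" := by
              have e : relevantYear - documentYear = -2 := by omega
              rw [e]; decide
            rw [if_pos h4, htag, List.filter_filter, pvSpeck_fst]
            congr 2
            exact List.filter_congr fun x _ => by unfold pvPred; simp only [String.reduceBEq, Bool.false_eq_true, if_false, if_true]; rw [Bool.and_comm]
          · rw [if_neg h4]
            by_cases h5 : documentYear - 3 = relevantYear
            · have htag : pvYearTag (relevantYear - documentYear) = some "PREVIOUS_YEAR_3" := by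
                have e : relevantYear - documentYear = -3 := by omega
                unfold pvYearTag
                rw [e]; norm_num
              rw [if_pos h5, htag, List.filter_filter, pvSpeck_fst]
              congr 2
              exact List.filter_congr fun x _ => by unfold pvPred; simp only [String.reduceBEq, Bool.false_eq_true, if_false, if_true]; rw [Bool.and_comm]
            · rw [if_neg h5]
              by_cases h6 : documentYear - 4 = relevantYear
              · have htag : pvYearTag (relevantYear - documentYear) = some "PREVIOUS_YEAR_3" := by
                  have e : relevantYear - documentYear = -4 := by omega
                  unfold pvYearTag
                  rw [e]; norm_num
                rw [if_pos h6, htag, List.filter_filter, pvSpeck_fst]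
                congr 2
                exact List.filter_congr fun x _ => by unfold pvPred; simp only [String.reduceBEq, Bool.false_eq_true, if_false, if_true]; rw [Bool.and_comm]
              · have htag : pvYearTag (relevantYear - documentYear) = none := by
                  unfold pvYearTag
                  rw [if_neg (by omega), if_neg (by omega), if_neg (by omega),
                      if_neg (by omega), if_neg (by omega), if_neg (by omega)]
                rw [if_neg h6, htag, pvSpeck_fst]
                congr 2
                exact List.filter_congr fun x _ => by unfold pvPred; simp
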